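-- pv_equiv track=rewrite | github.com/pouya-codes/singularity_create_groups | create_groups/__init__.py | select_patches_from_dict_as_dict
-- ===== SOURCE A (Python) =====
-- def select_patches_from_dict_as_dict(dict_patch, max_patches):
--     """Select at most max_patches patches from dict_patch, returning the patches as a dict.
--     """
--     selected_patches = {k: [] for k in dict_patch.keys()}
--     tmp_dict_patch = {}
--     while True:
--         if len(dict_patch) == 0:
--             break
--         num_selected_patches = sum(map(len, selected_patches.values()))
--         num_patches_each_key = max(0, max_patches - \
--                 num_selected_patches) // len(dict_patch)
--         num_patches_each_key = min(num_patches_each_key,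
--                 min(map(len, dict_patch.values())))
--         if num_patches_each_key < 1:
--             break
--         for key, patches in dict_patch.items():
--             selected_patches[key].extend(patches[:num_patches_each_key])
--             if len(patches[num_patches_each_key:]) > 0:
--                     tmp_dict_patch[key] = patches[num_patches_each_key:]
--         dict_patch = tmp_dict_patch
--         tmp_dict_patch = {}
--     return selected_patches
-- ===== SOURCE B (Python) =====
-- def select_patches_from_dict_as_dict(dict_patch, max_patches):
--     """Select at most max_patches patches from dict_patch, returning the patches as a dict.
--
--     Water-filling on counts: compute one cut level, then slice each list once.
--     """
--     rem = [len(v) for v in dict_patch.values()]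
--     level = 0
--     taken = 0
--     while rem:
--         budget = max(0, max_patches - taken)
--         share = min(budget // len(rem), min(rem))
--         if share < 1:
--             break
--         level += share
--         taken += share * len(rem)
--         rem = [r - share for r in rem if r > share]
--     return {k: v[:level] for k, v in dict_patch.items()}
-- ===== Notes on version B (the rewrite author's own statement) =====
-- stated objective: alternative
-- what changed: B runs the round loop on per-key remaining COUNTS only (a water-filling pass that produces one cut level) and slices each key's list once at the end, instead of A's re-slicing every remaining list and rebuilding both dicts on every round; a timing run found no measurable speed difference on the generated inputs.
import Mathlib
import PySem

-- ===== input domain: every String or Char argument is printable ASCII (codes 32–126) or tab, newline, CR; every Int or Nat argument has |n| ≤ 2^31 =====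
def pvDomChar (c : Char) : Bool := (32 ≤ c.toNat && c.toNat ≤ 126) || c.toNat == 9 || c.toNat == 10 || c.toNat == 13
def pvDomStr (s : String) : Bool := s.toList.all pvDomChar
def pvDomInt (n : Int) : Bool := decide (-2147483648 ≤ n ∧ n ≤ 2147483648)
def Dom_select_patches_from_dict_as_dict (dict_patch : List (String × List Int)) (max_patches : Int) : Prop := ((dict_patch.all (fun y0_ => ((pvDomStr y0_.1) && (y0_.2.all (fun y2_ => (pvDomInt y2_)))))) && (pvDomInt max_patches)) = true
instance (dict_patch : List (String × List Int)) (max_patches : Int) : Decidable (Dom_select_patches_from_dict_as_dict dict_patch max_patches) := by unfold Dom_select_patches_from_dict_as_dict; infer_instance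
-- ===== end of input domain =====

-- B replaces A's round-by-round re-slicing of every list with a water-filling loop over
-- per-key counts plus one final slice per key (no argument is mutated; return value only).

-- ===== PORT A =====
def pvSumLens (l : List (String × List Int)) : Nat := (l.map (fun kv => kv.2.length)).sum

-- A's 'while True' loop; the fuel (pvSumLens + 1) is a totality guard only: every executed
-- round removes at least one patch from dict_patch, so the loop breaks before fuel runs out
def pvALoop (max_patches : Int) : Nat → PySem.Dict String (List Int) → PySem.Dict String (List Int) → PySem.Dict String (List Int)
  | 0, _, selected => selected
  | fuel+1, dict_patch, selected =>
    if dict_patch.size = 0 then selected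
    else
      let num_selected : Int := (selected.values.map (fun v => (v.length : Int))).sum
      let q0 : Int := PySem.Int.floordiv (max 0 (max_patches - num_selected)) (dict_patch.size : Int)
      let q : Int := min q0 ((PySem.List.min? (dict_patch.values.map (fun v => (v.length : Int))) (fun x => x)).getD 0)
      if q < 1 then selected
      else
        let st := dict_patch.items.foldl
          (fun (st : PySem.Dict String (List Int) × PySem.Dict String (List Int)) kv =>
            (PySem.Dict.modify st.1 kv.1 [] (fun cur => cur ++ PySem.List.slice kv.2 none (some q)),
             if 0 < (PySem.List.slice kv.2 (some q) none).length then PySem.Dict.insert st.2 kv.1 (PySem.List.slice kv.2 (some q) none) else st.2))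
          (selected, PySem.Dict.empty)
        pvALoop max_patches fuel st.2 st.1

def select_patches_from_dict_as_dict (dict_patch : List (String × List Int)) (max_patches : Int) : List (String × List Int) :=
  let selected := dict_patch.foldl (fun d kv => PySem.Dict.insert d kv.1 ([] : List Int)) PySem.Dict.empty
  (pvALoop max_patches (pvSumLens dict_patch + 1) (PySem.Dict.mk dict_patch) selected).items

-- ===== PORT B =====
-- Source B's 'while rem' loop on counts; the same kind of totality-guard fuel
def pvLevelLoop (max_patches : Int) : Nat → Int → Int → List Int → Int
  | 0, level, _, _ => level
  | fuel+1, level, taken, rem =>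
    if rem.length = 0 then level
    else
      let budget : Int := max 0 (max_patches - taken)
      let share : Int := min (PySem.Int.floordiv budget (rem.length : Int)) ((PySem.List.min? rem (fun x => x)).getD 0)
      if share < 1 then level
      else pvLevelLoop max_patches fuel (level + share) (taken + share * (rem.length : Int))
             ((rem.filter (fun r => share < r)).map (fun r => r - share))

def select_patches_from_dict_as_dict_alt (dict_patch : List (String × List Int)) (max_patches : Int) : List (String × List Int) :=
  let rem := dict_patch.map (fun kv => (kv.2.length : Int))
  let level := pvLevelLoop max_patches ((dict_patch.map (fun kv => kv.2.length)).sum + 1) 0 0 rem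
  dict_patch.map (fun kv => (kv.1, PySem.List.slice kv.2 none (some level)))

-- ===== PRECONDITION & SPEC =====
-- Pre_ excludes association lists with duplicate keys: they do not represent a Python dict
-- (dict construction collapses duplicates), so A's behaviour on them is not defined by the source.
def Pre_select_patches_from_dict_as_dict (dict_patch : List (String × List Int)) (max_patches : Int) : Prop :=
  (dict_patch.map Prod.fst).Nodup
instance (dict_patch : List (String × List Int)) (max_patches : Int) : Decidable (Pre_select_patches_from_dict_as_dict dict_patch max_patches) := by unfold Pre_select_patches_from_dict_as_dict; infer_instance

def pvWitness_select_patches_from_dict_as_dict : (List (String × List Int)) × Int :=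
  ([("a", [1, 2, 3]), ("b", [4])], 3)

def Spec_select_patches_from_dict_as_dict (dict_patch : List (String × List Int)) (max_patches : Int) (out : List (String × List Int)) : Prop := out = select_patches_from_dict_as_dict_alt dict_patch max_patches
instance (dict_patch : List (String × List Int)) (max_patches : Int) (out : List (String × List Int)) : Decidable (Spec_select_patches_from_dict_as_dict dict_patch max_patches out) := by unfold Spec_select_patches_from_dict_as_dict; infer_instance

-- ===== CLAIM (what is proved, stated in full; the proofs are below) =====
def Claim_equal_select_patches_from_dict_as_dict : Prop := ∀ (dict_patch : List (String × List Int)) (max_patches : Int), Dom_select_patches_from_dict_as_dict dict_patch max_patches → Pre_select_patches_from_dict_as_dict dict_patch max_patches → Spec_select_patches_from_dict_as_dict dict_patch max_patches (select_patches_from_dict_as_dict dict_patch max_patches)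

-- ===== LEMMAS AND PROOFS =====
-- proof-only abbreviations: selected / remaining entries once the water level has reached n
def pvSel (orig : List (String × List Int)) (n : Nat) : List (String × List Int) :=
  orig.map (fun kv => (kv.1, kv.2.take n))
def pvRemD (orig : List (String × List Int)) (n : Nat) : List (String × List Int) :=
  (orig.filter (fun kv => decide (n < kv.2.length))).map (fun kv => (kv.1, kv.2.drop n))


lemma pvLevel_le (M : Int) : ∀ (fuel : Nat) (level taken : Int) (rem : List Int),
    level ≤ pvLevelLoop M fuel level taken rem := by
  intro fuel
  induction fuel with
  | zero => intro level taken rem; simp [pvLevelLoop]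
  | succ f ih =>
    intro level taken rem
    simp only [pvLevelLoop]
    split
    · exact le_refl _
    · split
      · exact le_refl _
      · rename_i h1 h2
        refine le_trans ?_ (ih _ _ _)
        omega

lemma pv_set_update_of_subset (s : PySem.Set String) (xs : List String)
    (h : ∀ x ∈ xs, x ∈ s) : PySem.Set.update s xs = s := by
  induction xs generalizing s with
  | nil => simp [PySem.Set.update]
  | cons x t ih =>
    have hx : x ∈ s := h x (by simp)
    have : PySem.Set.add s x = s := by
      simp only [PySem.Set.add]
      rw [if_pos]
      simpa [PySem.Set.contains] using hx
    simp only [PySem.Set.update, List.foldl_cons] at *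
    rw [show List.foldl PySem.Set.add (PySem.Set.add s x) t = List.foldl PySem.Set.add s t by rw [this]]
    exact ih s (fun y hy => h y (by simp [hy]))

lemma pv_getD_preserve (G : String × List Int → List Int → List Int) :
    ∀ (l : List (String × List Int)) (d : PySem.Dict String (List Int)) (k : String),
    k ∉ l.map Prod.fst →
    (l.foldl (fun d kv => d.modify kv.1 [] (G kv)) d).getD k [] = d.getD k [] := by
  intro l
  induction l with
  | nil => intro d k _; rfl
  | cons kv t ih =>
    intro d k hk
    simp only [List.map_cons, List.mem_cons, not_or] at hk
    simp only [List.foldl_cons]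
    rw [ih _ k (by exact fun h => hk.2 h)]
    exact PySem.Dict.getD_modify_of_ne d [] (G kv) hk.1

lemma pv_getD_foldl_modify (G : String × List Int → List Int → List Int) :
    ∀ (l : List (String × List Int)) (d : PySem.Dict String (List Int)) (k : String),
    (l.map Prod.fst).Nodup →
    (l.foldl (fun d kv => d.modify kv.1 [] (G kv)) d).getD k []
      = (match l.find? (fun kv => kv.1 == k) with
         | some kv => G kv (d.getD k [])
         | none => d.getD k []) := by
  intro l
  induction l with
  | nil => intro d k _; rfl
  | cons kv t ih =>
    intro d k hnd
    simp only [List.map_cons, List.nodup_cons] at hnd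
    simp only [List.foldl_cons, List.find?_cons]
    by_cases hk : kv.1 = k
    · subst hk
      simp only [beq_self_eq_true]
      rw [pv_getD_preserve G t _ kv.1 hnd.1]
      rw [PySem.Dict.getD_modify_self]
    · have hb : (kv.1 == k) = false := by simp [hk]
      rw [hb]
      rw [ih _ k hnd.2]
      rw [PySem.Dict.getD_modify_of_ne d [] (G kv) (fun h => hk h.symm)]

lemma pv_find_none (n : Nat) :
    ∀ (orig : List (String × List Int)) (k : String),
    k ∉ orig.map Prod.fst →
    (pvRemD orig n).find? (fun kv => kv.1 == k) = none := by
  intro orig k hk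
  rw [List.find?_eq_none]
  intro kv hkv
  simp only [pvRemD, List.mem_map, List.mem_filter] at hkv
  obtain ⟨kv', ⟨h1, _⟩, h2⟩ := hkv
  have : kv.1 = kv'.1 := by rw [← h2]
  simp only [ne_eq, this]
  intro he; exact hk (List.mem_map.mpr ⟨kv', h1, by simpa using he⟩)

lemma pv_find_remD (n : Nat) :
    ∀ (orig : List (String × List Int)) (k : String) (v : List Int),
    (orig.map Prod.fst).Nodup → (k, v) ∈ orig →
    (pvRemD orig n).find? (fun kv => kv.1 == k)
      = if n < v.length then some (k, v.drop n) else none := by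
  intro orig
  induction orig with
  | nil => intro k v _ h; simp at h
  | cons kv t ih =>
    intro k v hnd hm
    simp only [List.map_cons, List.nodup_cons] at hnd
    rcases List.mem_cons.mp hm with he | ht
    · -- head
      have hk : kv = (k, v) := he.symm
      subst hk
      by_cases hl : n < v.length
      · simp only [pvRemD, List.filter_cons, hl, decide_true, List.map_cons]
        simp [List.find?_cons, hl]
      · have : ¬ (n < (v : List Int).length) := hl
        simp only [pvRemD, List.filter_cons]
        rw [if_neg (by simpa using hl), if_neg hl]
        exact pv_find_none n t k hnd.1
    · -- in tail; kv.1 ≠ k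
      have hk : kv.1 ≠ k := by
        intro he2
        exact hnd.1 (by rw [he2]; exact List.mem_map.mpr ⟨(k, v), ht, rfl⟩)
      simp only [pvRemD, List.filter_cons]
      by_cases hl : n < kv.2.length
      · rw [if_pos (by simpa using hl)]
        simp only [List.map_cons, List.find?_cons]
        rw [show ((kv.1, kv.2.drop n).1 == k) = false by simpa using hk]
        exact ih k v hnd.2 ht
      · rw [if_neg (by simpa using hl)]
        exact ih k v hnd.2 ht

lemma pv_keys_remD_nodup (orig : List (String × List Int)) (n : Nat)
    (hnd : (orig.map Prod.fst).Nodup) : ((pvRemD orig n).map Prod.fst).Nodup := by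
  have : (pvRemD orig n).map Prod.fst = (orig.filter (fun kv => decide (n < kv.2.length))).map Prod.fst := by
    simp [pvRemD]
  rw [this]
  exact (List.filter_sublist.map Prod.fst).nodup hnd

lemma pv_sel_keys (orig : List (String × List Int)) (n : Nat) :
    (pvSel orig n).map Prod.fst = orig.map Prod.fst := by
  simp [pvSel]

lemma pv_sel_getD (orig : List (String × List Int)) (hnd : (orig.map Prod.fst).Nodup)
    (n : Nat) (k : String) (v : List Int) (hm : (k, v) ∈ orig) :
    (PySem.Dict.mk (pvSel orig n)).getD k [] = v.take n := by
  apply PySem.Dict.getD_of_mem_items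
  · show (k, v.take n) ∈ pvSel orig n
    exact List.mem_map.mpr ⟨(k, v), hm, rfl⟩
  · show ((pvSel orig n).map Prod.fst).Nodup
    rw [pv_sel_keys]; exact hnd

lemma pv_sel_step (orig : List (String × List Int)) (hnd : (orig.map Prod.fst).Nodup)
    (n qN : Nat) :
    ((pvRemD orig n).foldl (fun d kv => d.modify kv.1 [] (fun cur => cur ++ kv.2.take qN))
        (PySem.Dict.mk (pvSel orig n)))
      = PySem.Dict.mk (pvSel orig (n + qN)) := by
  set L := (pvRemD orig n).foldl (fun d kv => d.modify kv.1 [] (fun cur => cur ++ kv.2.take qN))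
        (PySem.Dict.mk (pvSel orig n)) with hL
  have hkeys : L.keys = orig.map Prod.fst := by
    rw [hL]
    rw [PySem.Dict.keys_foldl_modify_key (pvRemD orig n) Prod.fst []
      (fun _ kv => fun cur => cur ++ kv.2.take qN) (PySem.Dict.mk (pvSel orig n))]
    have h1 : (PySem.Dict.mk (pvSel orig n)).keys = orig.map Prod.fst := by
      show (pvSel orig n).map Prod.fst = _
      exact pv_sel_keys orig n
    rw [h1]
    apply pv_set_update_of_subset
    intro x hx
    simp only [pvRemD, List.map_map, List.mem_map, List.mem_filter] at hx
    obtain ⟨kv, ⟨h1', _⟩, h2⟩ := hx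
    exact List.mem_map.mpr ⟨kv, h1', h2⟩
  have hndL : L.keys.Nodup := by rw [hkeys]; exact hnd
  apply PySem.Dict.ext
  rw [PySem.Dict.items_eq_map_keys L hndL []]
  show _ = pvSel orig (n + qN)
  rw [hkeys]
  rw [List.map_map]
  apply List.map_congr_left
  intro kv hm
  have hm' : (kv.1, kv.2) ∈ orig := by simpa using hm
  have hfind := pv_find_remD n orig kv.1 kv.2 hnd hm'
  have hgetD : L.getD kv.1 [] = kv.2.take (n + qN) := by
    rw [hL, pv_getD_foldl_modify _ (pvRemD orig n) _ kv.1 (pv_keys_remD_nodup orig n hnd)]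
    rw [hfind]
    by_cases hl : n < kv.2.length
    · rw [if_pos hl]
      rw [pv_sel_getD orig hnd n kv.1 kv.2 hm']
      exact (List.take_add ..).symm
    · rw [if_neg hl]
      rw [pv_sel_getD orig hnd n kv.1 kv.2 hm']
      rw [List.take_of_length_le (by omega), List.take_of_length_le (by omega)]
  simp only [Function.comp_apply, hgetD]

lemma pv_tmp_step (orig : List (String × List Int)) (hnd : (orig.map Prod.fst).Nodup)
    (n qN : Nat) (hq : 1 ≤ qN) :
    ((pvRemD orig n).foldl
        (fun d kv => if 0 < (kv.2.drop qN).length then d.insert kv.1 (kv.2.drop qN) else d)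
        PySem.Dict.empty).items
      = pvRemD orig (n + qN) := by
  rw [PySem.List.foldl_ite_eq_foldl_filter (fun kv => 0 < ((kv.2 : List Int).drop qN).length)
      (fun d kv => d.insert kv.1 (kv.2.drop qN)) (pvRemD orig n) PySem.Dict.empty]
  have hfresh := PySem.Dict.items_foldl_insert_fresh
      (l := (pvRemD orig n).filter (fun x => decide (0 < ((x.2 : List Int).drop qN).length)))
      (k := fun kv : String × List Int => kv.1) (v := fun kv : String × List Int => kv.2.drop qN)
      (d := PySem.Dict.empty)
      (fun a _ => PySem.Dict.contains_empty a.1)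
      (by
        have hs : ((pvRemD orig n).filter
            (fun x => decide (0 < ((x.2 : List Int).drop qN).length))).Sublist (pvRemD orig n) :=
          List.filter_sublist
        exact (hs.map _).nodup (pv_keys_remD_nodup orig n hnd))
  simp only [] at hfresh
  rw [hfresh]
  show ((pvRemD orig n).filter _).map (fun kv => (kv.1, kv.2.drop qN)) = _
  simp only [pvRemD, List.filter_map, List.map_map, List.filter_filter]
  rw [List.filter_congr (q := fun kv : String × List Int => decide (n + qN < kv.2.length))
    (by
      intro kv _
      simp only [Function.comp_apply, List.length_drop, ← Bool.decide_and, decide_eq_decide]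
      omega)]
  apply List.map_congr_left
  intro kv _
  simp only [Function.comp_apply, List.drop_drop]

lemma pv_taken_step (n qN : Nat) :
    ∀ (orig : List (String × List Int)),
    (∀ kv ∈ orig, n < kv.2.length → n + qN ≤ kv.2.length) →
    (orig.map (fun kv => min kv.2.length (n + qN))).sum
      = (orig.map (fun kv => min kv.2.length n)).sum
        + qN * orig.countP (fun kv => decide (n < kv.2.length)) := by
  intro orig
  induction orig with
  | nil => intro _; simp
  | cons kv t ih =>
    intro h
    have hkv := h kv (List.mem_cons_self)
    have ht := ih (fun x hx => h x (List.mem_cons_of_mem _ hx))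
    simp only [List.map_cons, List.sum_cons, List.countP_cons]
    rw [ht]
    by_cases hl : n < kv.2.length
    · simp only [hl, decide_true, if_true]
      have : min kv.2.length (n + qN) = min kv.2.length n + qN := by
        have := hkv hl; omega
      rw [Nat.mul_add, Nat.mul_one]
      omega
    · simp [hl]
      have : min kv.2.length (n + qN) = min kv.2.length n := by omega
      omega

lemma pv_rem_step (orig : List (String × List Int)) (n qN : Nat) (q : Int)
    (hcast : q = (qN : Int)) (hq : 1 ≤ qN) :
    (((pvRemD orig n).map (fun kv => (kv.2.length : Int))).filter (fun r => q < r)).map (fun r => r - q)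
      = (pvRemD orig (n + qN)).map (fun kv => (kv.2.length : Int)) := by
  subst hcast
  simp only [pvRemD, List.filter_map, List.map_map, List.filter_filter]
  rw [List.filter_congr (q := fun kv : String × List Int => decide (n + qN < kv.2.length))
    (by
      intro kv _
      simp only [Function.comp_apply, List.length_drop, ← Bool.decide_and, decide_eq_decide]
      omega)]
  apply List.map_congr_left
  intro kv hm
  have : n + qN < kv.2.length := by
    simpa using (List.mem_filter.mp hm).2
  simp only [Function.comp_apply, List.length_drop]
  omega

lemma pv_cast_sum (l : List Nat) : ((l.sum : Nat) : Int) = (l.map (fun x : Nat => (x : Int))).sum := by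
  induction l with
  | nil => simp
  | cons x t ih => simp [ih]

lemma pv_num_selected (orig : List (String × List Int)) (n : Nat) :
    ((PySem.Dict.mk (pvSel orig n)).values.map (fun v => ((v : List Int).length : Int))).sum
      = ((orig.map (fun kv => min kv.2.length n)).sum : Int) := by
  rw [pv_cast_sum]
  show (((pvSel orig n).map Prod.snd).map (fun v => ((v : List Int).length : Int))).sum = _
  simp only [pvSel, List.map_map]
  congr 1
  apply List.map_congr_left
  intro kv _
  simp [List.length_take, Nat.min_comm]

lemma pv_vals_lens (orig : List (String × List Int)) (n : Nat) :
    (PySem.Dict.mk (pvRemD orig n)).values.map (fun v => ((v : List Int).length : Int))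
      = (pvRemD orig n).map (fun kv => (kv.2.length : Int)) := by
  show ((pvRemD orig n).map Prod.snd).map (fun v => ((v : List Int).length : Int)) = _
  rw [List.map_map]
  rfl

lemma pv_main (M : Int) (orig : List (String × List Int)) (hnd : (orig.map Prod.fst).Nodup) :
    ∀ (fuel : Nat) (n : Nat) (taken : Int),
    taken = ((orig.map (fun kv => min kv.2.length n)).sum : Int) →
    (pvALoop M fuel (PySem.Dict.mk (pvRemD orig n)) (PySem.Dict.mk (pvSel orig n))).items
      = pvSel orig (pvLevelLoop M fuel (n : Int) taken
          ((pvRemD orig n).map (fun kv => (kv.2.length : Int)))).toNat := by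
  intro fuel
  induction fuel with
  | zero =>
    intro n taken _
    simp [pvALoop, pvLevelLoop]
  | succ f ih =>
    intro n taken htaken
    simp only [pvALoop, pvLevelLoop]
    by_cases h0 : (pvRemD orig n).length = 0
    · rw [if_pos (show (PySem.Dict.mk (pvRemD orig n)).size = 0 from h0),
          if_pos (show ((pvRemD orig n).map (fun kv => (kv.2.length : Int))).length = 0 by simpa using h0)]
      simp
    · rw [if_neg (show ¬ (PySem.Dict.mk (pvRemD orig n)).size = 0 from h0),
          if_neg (show ¬ ((pvRemD orig n).map (fun kv => (kv.2.length : Int))).length = 0 by simpa using h0)]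
      rw [pv_num_selected orig n, ← htaken, pv_vals_lens orig n]
      simp only [List.length_map, show (PySem.Dict.mk (pvRemD orig n)).size = (pvRemD orig n).length from rfl]
      set Q := min (PySem.Int.floordiv (max 0 (M - taken)) ((pvRemD orig n).length : Int))
        ((PySem.List.min? ((pvRemD orig n).map (fun kv => ((kv.2 : List Int).length : Int))) (fun x => x)).getD 0) with hQ
      by_cases hq1 : Q < 1
      · rw [if_pos hq1, if_pos hq1]
        simp
      · rw [if_neg hq1, if_neg hq1]
        push_neg at hq1
        set qN := Q.toNat with hqN
        have hcast : Q = (qN : Int) := by omega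
        have hq1N : 1 ≤ qN := by omega
        have hbound : ∀ kv ∈ orig, n < kv.2.length → n + qN ≤ kv.2.length := by
          intro kv hm hl
          have hmem : ((kv.2.length - n : Nat) : Int) ∈ (pvRemD orig n).map (fun kv => ((kv.2 : List Int).length : Int)) := by
            refine List.mem_map.mpr ⟨(kv.1, kv.2.drop n), ?_, by simp⟩
            exact List.mem_map.mpr ⟨kv, List.mem_filter.mpr ⟨hm, by simpa using hl⟩, rfl⟩
          obtain ⟨m, hmeq⟩ : ∃ m, PySem.List.min? ((pvRemD orig n).map (fun kv => ((kv.2 : List Int).length : Int))) (fun x => x) = some m := by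
            cases hme : PySem.List.min? ((pvRemD orig n).map (fun kv => ((kv.2 : List Int).length : Int))) (fun x => x) with
            | none =>
              exfalso
              have hnil := (PySem.List.min?_eq_none_iff _ _).mp hme
              have := congrArg List.length hnil
              simp at this
              exact h0 (by simp [this])
            | some m => exact ⟨m, rfl⟩
          have hQm : Q ≤ m := by
            rw [hQ, hmeq]
            exact min_le_of_right_le (le_of_eq rfl)
          have hmr := PySem.List.min?_isMin hmeq _ hmem
          simp only [] at hmr
          omega
        rw [PySem.List.foldl_prod_mk
          (f := fun (d : PySem.Dict String (List Int)) (kv : String × List Int) =>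
            d.modify kv.1 [] (fun cur => cur ++ PySem.List.slice kv.2 none (some Q)))
          (g := fun (d : PySem.Dict String (List Int)) (kv : String × List Int) =>
            if 0 < (PySem.List.slice kv.2 (some Q)).length then d.insert kv.1 (PySem.List.slice kv.2 (some Q)) else d)]
        simp only [hcast, PySem.List.slice_to_natCast, PySem.List.slice_from_natCast]
        rw [pv_sel_step orig hnd n qN]
        have htmp : ((pvRemD orig n).foldl
            (fun d kv => if 0 < ((kv.2 : List Int).drop qN).length then d.insert kv.1 (kv.2.drop qN) else d)
            PySem.Dict.empty) = PySem.Dict.mk (pvRemD orig (n + qN)) := by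
          apply PySem.Dict.ext
          rw [pv_tmp_step orig hnd n qN hq1N]
        rw [htmp]
        rw [pv_rem_step orig n qN (qN : Int) rfl hq1N]
        have htaken' : taken + (qN : Int) * ((pvRemD orig n).length : Int)
            = ((orig.map (fun kv => min kv.2.length (n + qN))).sum : Int) := by
          rw [pv_taken_step n qN orig hbound, htaken]
          have hcount : (pvRemD orig n).length = orig.countP (fun kv => decide (n < kv.2.length)) := by
            simp only [pvRemD, List.length_map]
            exact List.countP_eq_length_filter.symm
          rw [hcount]
          push_cast
          ring
        rw [show (n : Int) + (qN : Int) = ((n + qN : Nat) : Int) by push_cast; ring]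
        exact ih (n + qN) _ htaken'
lemma pv_min_le_zero (l : List Int) (h : (0 : Int) ∈ l) :
    ((PySem.List.min? l (fun x => x)).getD 0) ≤ 0 := by
  cases hme : PySem.List.min? l (fun x => x) with
  | none => simp
  | some m =>
    have := PySem.List.min?_isMin hme 0 h
    simpa using this

lemma pv_init_sel (dict_patch : List (String × List Int)) (hnd : (dict_patch.map Prod.fst).Nodup) :
    (dict_patch.foldl (fun d kv => PySem.Dict.insert d kv.1 ([] : List Int)) PySem.Dict.empty)
      = PySem.Dict.mk (pvSel dict_patch 0) := by
  apply PySem.Dict.ext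
  have hfresh := PySem.Dict.items_foldl_insert_fresh (l := dict_patch)
      (k := fun kv : String × List Int => kv.1) (v := fun _ : String × List Int => ([] : List Int))
      (d := PySem.Dict.empty)
      (fun a _ => PySem.Dict.contains_empty a.1) hnd
  simp only [] at hfresh
  rw [hfresh]
  show _ ++ _ = pvSel dict_patch 0
  simp [pvSel, PySem.Dict.empty]

lemma pv_remD_zero (dict_patch : List (String × List Int))
    (hz : ∀ kv ∈ dict_patch, kv.2 ≠ ([] : List Int)) : pvRemD dict_patch 0 = dict_patch := by
  unfold pvRemD
  rw [List.filter_eq_self.mpr (by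
    intro kv hm
    have := hz kv hm
    simp only [decide_eq_true_eq]
    cases h : kv.2 with
    | nil => exact absurd h this
    | cons a t => simp)]
  have hid : (fun kv : String × List Int => (kv.1, kv.2.drop 0)) = id := funext (fun kv => by simp)
  rw [hid, List.map_id]

-- ===== VERDICT (by name: the statement is the Claim_ definition above) =====
theorem select_patches_from_dict_as_dict_spec : Claim_equal_select_patches_from_dict_as_dict := by
  intro dp M _hdom hpre
  unfold Pre_select_patches_from_dict_as_dict at hpre
  unfold Spec_select_patches_from_dict_as_dict
  show (pvALoop M (pvSumLens dp + 1) (PySem.Dict.mk dp)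
      (dp.foldl (fun d kv => PySem.Dict.insert d kv.1 ([] : List Int)) PySem.Dict.empty)).items
    = dp.map (fun kv => (kv.1, PySem.List.slice kv.2 none
        (some (pvLevelLoop M ((dp.map (fun kv => kv.2.length)).sum + 1) 0 0 (dp.map (fun kv => (kv.2.length : Int)))))))
  rw [show (dp.map (fun kv => kv.2.length)).sum + 1 = pvSumLens dp + 1 from rfl]
  rw [pv_init_sel dp hpre]
  by_cases hz : ∀ kv ∈ dp, kv.2 ≠ ([] : List Int)
  · -- no empty value: the loop invariant applies from level 0
    have hrem0 : pvRemD dp 0 = dp := pv_remD_zero dp hz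
    have hmain := pv_main M dp hpre (pvSumLens dp + 1) 0 0 (by simp)
    rw [hrem0] at hmain
    rw [hmain]
    have hC : (0 : Int) ≤ pvLevelLoop M (pvSumLens dp + 1) ((0 : Nat) : Int) 0 (dp.map (fun kv => (kv.2.length : Int))) := by
      simpa using pvLevel_le M (pvSumLens dp + 1) 0 0 (dp.map (fun kv => (kv.2.length : Int)))
    set C := pvLevelLoop M (pvSumLens dp + 1) ((0 : Nat) : Int) 0 (dp.map (fun kv => (kv.2.length : Int))) with hCdef
    unfold pvSel
    apply List.map_congr_left
    intro kv _
    rw [show (pvLevelLoop M (pvSumLens dp + 1) 0 0 (dp.map (fun kv => (kv.2.length : Int)))) = C by rw [hCdef]; norm_num]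
    rw [show C = ((C.toNat : Nat) : Int) by omega]
    rw [PySem.List.slice_to_natCast]
    simp
    omega
  · -- some value is empty: both loops stop immediately at level 0
    push_neg at hz
    obtain ⟨kv0, hm0, he0⟩ := hz
    have hne : dp ≠ [] := by intro h; rw [h] at hm0; simp at hm0
    have hsz : ¬ (PySem.Dict.mk dp).size = 0 := by
      show ¬ dp.length = 0
      simpa using hne
    have hmemA : (0 : Int) ∈ (PySem.Dict.mk dp).values.map (fun v => ((v : List Int).length : Int)) := by
      show (0 : Int) ∈ (dp.map Prod.snd).map (fun v => ((v : List Int).length : Int))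
      refine List.mem_map.mpr ⟨kv0.2, List.mem_map.mpr ⟨kv0, hm0, rfl⟩, by simp [he0]⟩
    have hmemB : (0 : Int) ∈ dp.map (fun kv => ((kv.2 : List Int).length : Int)) :=
      List.mem_map.mpr ⟨kv0, hm0, by simp [he0]⟩
    simp only [pvALoop, pvLevelLoop]
    rw [if_neg hsz, if_neg (show ¬ (dp.map (fun kv => ((kv.2 : List Int).length : Int))).length = 0 by simpa using hne)]
    rw [if_pos (show min (PySem.Int.floordiv (max 0 (M - ((PySem.Dict.mk (pvSel dp 0)).values.map (fun v => ((v : List Int).length : Int))).sum)) ((PySem.Dict.mk dp).size : Int))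
        ((PySem.List.min? ((PySem.Dict.mk dp).values.map (fun v => ((v : List Int).length : Int))) (fun x => x)).getD 0) < 1 from
      lt_of_le_of_lt (le_trans (min_le_right _ _) (pv_min_le_zero _ hmemA)) (by norm_num))]
    rw [if_pos (show min (PySem.Int.floordiv (max 0 (M - 0)) ((dp.map (fun kv => ((kv.2 : List Int).length : Int))).length : Int))
        ((PySem.List.min? (dp.map (fun kv => ((kv.2 : List Int).length : Int))) (fun x => x)).getD 0) < 1 from
      lt_of_le_of_lt (le_trans (min_le_right _ _) (pv_min_le_zero _ hmemB)) (by norm_num))]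
    show pvSel dp 0 = _
    unfold pvSel
    apply List.map_congr_left
    intro kv _
    simp [PySem.List.slice]
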